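-- pv_equiv track=rewrite | github.com/JuanArenas2002/InvestigacionUnisimon | extractors/serial_title/domain/journal_coverage.py | build_coverage_periods
-- ===== SOURCE A (Python) =====
-- from typing import List, Tuple, Optional, Dict
--
-- def build_coverage_periods(
--     yearly_info: list,
--     declared_end_year: Optional[int] = None,
-- ) -> Tuple[List[Tuple[int, int]], Optional[int], Optional[int]]:
--     """
--     Construye la lista de periodos de cobertura desde los datos anuales
--     del Serial Title API de Scopus.
--
--     Scopus no devuelve los periodos de cobertura explícitamente. La fuente
--     real son los años con publicationCount > 0 en yearly-data.info. Esta
--     función agrupa esos años en rangos consecutivos (periodos).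
--
--     Lógica:
--       1. Filtra años con publicationCount > 0 de yearly_info.
--       2. Agrupa años consecutivos en rangos (start, end).
--       3. Si no hay datos anuales, usa coverageStartYear/EndYear como fallback.
--       4. Si declared_end_year > último período calculado, extiende el último.
--
--     Args:
--         yearly_info: Lista de dicts de yearly-data.info del JSON de Scopus.
--                      Cada dict tiene '@year' y 'publicationCount'.
--         declared_end_year: Valor de coverageEndYear declarado por Scopus.
--                            Puede ser mayor que el último año con datos
--                            (Scopus no carga datos del año en curso hasta meses después).
--
--     Returns:
--         Tupla (coverage_periods, coverage_from, coverage_to):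
--           - coverage_periods: Lista de (start, end) en orden cronológico.
--           - coverage_from: Año de inicio de la primera cobertura, o None.
--           - coverage_to:   Año de fin de la última cobertura, o None.
--     """
--     # Filtrar y ordenar años con publicaciones
--     active_years: List[int] = sorted(
--         int(y["@year"])
--         for y in (yearly_info or [])
--         if isinstance(y, dict)
--         and y.get("@year")
--         and int(y.get("publicationCount") or 0) > 0
--     )
--
--     periods_set: set = set()
--
--     if active_years:
--         # Agrupar años consecutivos en rangos
--         start = active_years[0]
--         prev  = active_years[0]
--         for yr in active_years[1:]:
--             if yr == prev + 1:
--                 prev = yr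
--             else:
--                 periods_set.add((start, prev))
--                 start = yr
--                 prev  = yr
--         periods_set.add((start, prev))
--
--     coverage_periods: List[Tuple[int, int]] = sorted(periods_set, key=lambda t: t[0])
--
--     coverage_from = coverage_periods[0][0]  if coverage_periods else None
--     coverage_to   = coverage_periods[-1][1] if coverage_periods else None
--
--     # Extender el último período si declared_end_year es mayor
--     # (Scopus puede estar 1-2 años atrás en sus datos anuales)
--     if declared_end_year and (coverage_to is None or declared_end_year > coverage_to):
--         coverage_to = declared_end_year
--         if coverage_periods:
--             last_start, last_end = coverage_periods[-1]
--             if declared_end_year > last_end: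
--                 coverage_periods[-1] = (last_start, declared_end_year)
--
--     return coverage_periods, coverage_from, coverage_to
-- ===== SOURCE B (Python) =====
-- from typing import List, Tuple, Optional
--
-- def build_coverage_periods(
--     yearly_info: list,
--     declared_end_year: Optional[int] = None,
-- ) -> Tuple[List[Tuple[int, int]], Optional[int], Optional[int]]:
--     """Group active years into consecutive coverage ranges by boundary
--     detection: a year is a run START if its predecessor is not year-1 and a
--     run END if its successor is not year+1; zipping the two boundary lists
--     gives the periods directly, with no start/prev state machine."""
--     active_years: List[int] = sorted(
--         int(y["@year"])
--         for y in (yearly_info or [])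
--         if isinstance(y, dict)
--         and y.get("@year")
--         and int(y.get("publicationCount") or 0) > 0
--     )
--
--     starts = [y for p, y in zip([None] + active_years, active_years)
--               if p is None or y != p + 1]
--     ends = [y for y, n in zip(active_years, active_years[1:] + [None])
--             if n is None or n != y + 1]
--     periods_set: set = set(zip(starts, ends))
--
--     coverage_periods: List[Tuple[int, int]] = sorted(periods_set, key=lambda t: t[0])
--
--     if not coverage_periods:
--         coverage_to = declared_end_year if declared_end_year else None
--         return [], None, coverage_to
--
--     coverage_from = coverage_periods[0][0]
--     last_start, last_end = coverage_periods[-1]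
--     if declared_end_year and declared_end_year > last_end:
--         coverage_periods[-1] = (last_start, declared_end_year)
--         return coverage_periods, coverage_from, declared_end_year
--     return coverage_periods, coverage_from, last_end
-- ===== Notes on version B (the rewrite author's own statement) =====
-- stated objective: alternative
-- what changed: Replaces A's start/prev state machine with declarative boundary detection: run starts (predecessor is not year-1) and run ends (successor is not year+1) are selected by zipping the year list with its shifted self and paired by zip into periods, and the final extension logic branches on emptiness first instead of threading Optionals.
import Mathlib
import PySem

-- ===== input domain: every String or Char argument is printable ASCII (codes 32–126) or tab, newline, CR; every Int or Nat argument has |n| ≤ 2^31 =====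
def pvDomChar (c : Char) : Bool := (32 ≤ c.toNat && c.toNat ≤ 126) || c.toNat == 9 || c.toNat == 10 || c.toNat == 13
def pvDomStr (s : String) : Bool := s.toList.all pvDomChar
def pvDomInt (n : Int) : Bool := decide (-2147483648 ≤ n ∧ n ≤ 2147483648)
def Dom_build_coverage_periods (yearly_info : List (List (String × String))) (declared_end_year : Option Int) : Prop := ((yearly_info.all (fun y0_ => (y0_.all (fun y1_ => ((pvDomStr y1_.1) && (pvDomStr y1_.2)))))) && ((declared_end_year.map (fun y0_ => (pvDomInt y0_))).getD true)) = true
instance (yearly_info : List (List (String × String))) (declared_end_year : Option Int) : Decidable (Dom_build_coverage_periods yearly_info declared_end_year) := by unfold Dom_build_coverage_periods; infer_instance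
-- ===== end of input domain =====

-- B replaces A's start/prev state machine with boundary detection (zip the year list with its
-- shifted self to pick run starts and run ends, pair them by zip) and a finalization that
-- branches on emptiness first; same asymptotic cost, return value proved equal on Pre_.


-- shared helpers: Python truthiness of declared_end_year, and the identical
-- 'active_years' generator expression both Pythons contain verbatim
def pvTruthy (o : Option Int) : Bool :=
  match o with
  | some d => d != 0
  | none => false

-- the filtered generator: int(y["@year"]) for dicts with truthy '@year' and publicationCount > 0
-- (on inputs excluded by Pre_ the .getD 0 stands where Python's int() raises)
def pvYears (yearly_info : List (List (String × String))) : List Int :=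
  yearly_info.filterMap (fun y =>
    match (PySem.Dict.mk y).get? "@year" with
    | none => none
    | some ay =>
      if ay = "" then none
      else
        let pc := ((PySem.Dict.mk y).get? "publicationCount").getD ""
        let pcv : Int := if pc = "" then 0 else (PySem.Int.ofStr? pc).getD 0
        if 0 < pcv then some ((PySem.Int.ofStr? ay).getD 0) else none)

def pvActiveYears (yearly_info : List (List (String × String))) : List Int :=
  PySem.List.sorted (pvYears yearly_info) (fun x => x) false

-- ===== PORT A =====
-- the loop body: if yr == prev + 1: prev = yr  else: periods_set.add((start, prev)); start = prev = yr
def pvStepA (s : Int × Int × PySem.Set (Int × Int)) (yr : Int) : Int × Int × PySem.Set (Int × Int) :=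
  if yr = s.2.1 + 1 then (s.1, yr, s.2.2) else (yr, yr, PySem.Set.add s.2.2 (s.1, s.2.1))

-- the trailing periods_set.add((start, prev))
def pvCloseA (r : Int × Int × PySem.Set (Int × Int)) : PySem.Set (Int × Int) :=
  PySem.Set.add r.2.2 (r.1, r.2.1)

def pvPeriodsA (active : List Int) : PySem.Set (Int × Int) :=
  match active with
  | [] => PySem.Set.empty
  | a :: rest => pvCloseA (rest.foldl pvStepA (a, a, PySem.Set.empty))

-- coverage_from / coverage_to and the declared_end_year extension, as in A
def pvFinishA (cps : List (Int × Int)) (dey : Option Int) :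
    (List (Int × Int)) × Option Int × Option Int :=
  let coverage_from : Option Int := if cps.isEmpty then none else some ((cps.headD (0, 0)).1)
  let coverage_to : Option Int := if cps.isEmpty then none else some ((cps.getLastD (0, 0)).2)
  if pvTruthy dey && (coverage_to.isNone || decide (coverage_to.getD 0 < dey.getD 0)) then
    (if cps.isEmpty then cps
     else if (cps.getLastD (0, 0)).2 < dey.getD 0 then
       cps.dropLast ++ [((cps.getLastD (0, 0)).1, dey.getD 0)]
     else cps,
     coverage_from, some (dey.getD 0))
  else (cps, coverage_from, coverage_to)

def build_coverage_periods (yearly_info : List (List (String × String))) (declared_end_year : Option Int) : (List (Int × Int)) × Option Int × Option Int :=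
  pvFinishA (PySem.List.sorted (pvPeriodsA (pvActiveYears yearly_info)) (fun t => t.1) false)
    declared_end_year

-- ===== PORT B =====
-- 'p is None or y != p + 1'
def pvStartCond (py : Option Int × Int) : Bool :=
  match py.1 with
  | none => true
  | some p => py.2 != p + 1

-- 'n is None or n != y + 1'
def pvEndCond (yn : Int × Option Int) : Bool :=
  match yn.2 with
  | none => true
  | some n => n != yn.1 + 1

-- starts = boundary years after zip with [None] + active; ends dually with active[1:] + [None]
def pvPeriodsB (active : List Int) : PySem.Set (Int × Int) :=
  PySem.Set.ofList
    (((((none :: active.map some).zip active).filter pvStartCond).map (·.2)).zip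
     (((active.zip ((PySem.List.slice active (some 1) none).map some ++ [none])).filter pvEndCond).map (·.1)))

-- B's finalization: branch on emptiness first, then one comparison against the last end
def pvFinishB (cps : List (Int × Int)) (dey : Option Int) :
    (List (Int × Int)) × Option Int × Option Int :=
  if cps.isEmpty then
    ([], none, if pvTruthy dey then some (dey.getD 0) else none)
  else
    let coverage_from := (cps.headD (0, 0)).1
    let last := cps.getLastD (0, 0)
    if pvTruthy dey && decide (last.2 < dey.getD 0) then
      (cps.dropLast ++ [(last.1, dey.getD 0)], some coverage_from, some (dey.getD 0))
    else (cps, some coverage_from, some last.2)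

def build_coverage_periods_alt (yearly_info : List (List (String × String))) (declared_end_year : Option Int) : (List (Int × Int)) × Option Int × Option Int :=
  pvFinishB (PySem.List.sorted (pvPeriodsB (pvActiveYears yearly_info)) (fun t => t.1) false)
    declared_end_year

-- ===== PRECONDITION & SPEC =====
-- an entry is safe iff A's int() calls on it cannot raise ValueError
def pvEntryOk (y : List (String × String)) : Bool :=
  match (PySem.Dict.mk y).get? "@year" with
  | none => true
  | some ay =>
    if ay = "" then true
    else
      let pc := ((PySem.Dict.mk y).get? "publicationCount").getD ""
      if pc = "" then true
      else
        match PySem.Int.ofStr? pc with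
        | none => false
        | some n => if 0 < n then (PySem.Int.ofStr? ay).isSome else true

-- Pre_ excludes (i) inputs where A raises ValueError (a non-int-like '@year' or
-- 'publicationCount' string), and (ii) inputs where two entries contribute the same active
-- year: there two periods can share a start and A's order among them follows CPython's
-- accidental set iteration order, which no port can pin down.
def Pre_build_coverage_periods (yearly_info : List (List (String × String))) (declared_end_year : Option Int) : Prop :=
  (∀ y ∈ yearly_info, pvEntryOk y = true) ∧ (pvYears yearly_info).Nodup

instance (yearly_info : List (List (String × String))) (declared_end_year : Option Int) : Decidable (Pre_build_coverage_periods yearly_info declared_end_year) := by unfold Pre_build_coverage_periods; infer_instance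

def pvWitness_build_coverage_periods : (List (List (String × String))) × Option Int :=
  ([[("@year", "2001"), ("publicationCount", "1")],
    [("@year", "2002"), ("publicationCount", "2")],
    [("@year", "2005"), ("publicationCount", "1")]], some 2006)

def Spec_build_coverage_periods (yearly_info : List (List (String × String))) (declared_end_year : Option Int) (out : (List (Int × Int)) × Option Int × Option Int) : Prop := out = build_coverage_periods_alt yearly_info declared_end_year
instance (yearly_info : List (List (String × String))) (declared_end_year : Option Int) (out : (List (Int × Int)) × Option Int × Option Int) : Decidable (Spec_build_coverage_periods yearly_info declared_end_year out) := by unfold Spec_build_coverage_periods; infer_instance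

-- ===== CLAIM (what is proved, stated in full; the proofs are below) =====
def Claim_equal_build_coverage_periods : Prop := ∀ (yearly_info : List (List (String × String))) (declared_end_year : Option Int), Dom_build_coverage_periods yearly_info declared_end_year → Pre_build_coverage_periods yearly_info declared_end_year → Spec_build_coverage_periods yearly_info declared_end_year (build_coverage_periods yearly_info declared_end_year)

-- ===== LEMMAS AND PROOFS =====

-- the list of (start, end) runs A's state machine emits, in emission order
def pvRuns : Int → Int → List Int → List (Int × Int)
  | start, prev, [] => [(start, prev)]
  | start, prev, yr :: t =>
    if yr = prev + 1 then pvRuns start yr t else (start, prev) :: pvRuns yr yr t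

-- recursive views of B's two boundary comprehensions
def pvStartsR : Int → List Int → List Int
  | _, [] => []
  | prev, y :: t => if y = prev + 1 then pvStartsR y t else y :: pvStartsR y t

def pvEndsR : List Int → List Int
  | [] => []
  | [a] => [a]
  | a :: b :: t => if b = a + 1 then pvEndsR (b :: t) else a :: pvEndsR (b :: t)

theorem pvFoldA_eq (t : List Int) : ∀ (start prev : Int) (s : PySem.Set (Int × Int)),
    pvCloseA (t.foldl pvStepA (start, prev, s)) = (pvRuns start prev t).foldl PySem.Set.add s := by
  induction t with
  | nil => intro start prev s; simp [pvCloseA, pvRuns]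
  | cons yr t ih =>
    intro start prev s
    by_cases h : yr = prev + 1 <;>
      simp only [List.foldl_cons, pvStepA, pvRuns, h, if_pos, if_neg, not_false_iff] <;>
      simp [ih]

theorem pvStarts_eq (t : List Int) : ∀ prev : Int,
    (((some prev :: t.map some).zip t).filter pvStartCond).map (·.2) = pvStartsR prev t := by
  induction t with
  | nil => intro prev; simp [pvStartsR]
  | cons y t ih =>
    intro prev
    simp only [List.map_cons, List.zip_cons_cons, List.filter_cons]
    by_cases h : y = prev + 1 <;>
      simp [pvStartCond, pvStartsR, h, ih]

theorem pvEnds_eq (l : List Int) :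
    ((l.zip ((l.tail).map some ++ [none])).filter pvEndCond).map (·.1) = pvEndsR l := by
  induction l with
  | nil => simp [pvEndsR]
  | cons a t ih =>
    cases t with
    | nil => simp [pvEndCond, pvEndsR]
    | cons b t' =>
      simp only [List.tail_cons] at ih
      by_cases h : b = a + 1
      · subst h
        simpa [pvEndCond, pvEndsR] using ih
      · simp [pvEndCond, pvEndsR, h, ih]

theorem pvZip_eq (t : List Int) : ∀ start prev : Int,
    (start :: pvStartsR prev t).zip (pvEndsR (prev :: t)) = pvRuns start prev t := by
  induction t with
  | nil => intro start prev; simp [pvStartsR, pvEndsR, pvRuns]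
  | cons y t ih =>
    intro start prev
    by_cases h : y = prev + 1 <;>
      simp [pvStartsR, pvEndsR, pvRuns, h, ih]

theorem pvPeriods_eq (active : List Int) : pvPeriodsA active = pvPeriodsB active := by
  cases active with
  | nil => rfl
  | cons a rest =>
    have hs : ((((none :: (a :: rest).map some).zip (a :: rest)).filter pvStartCond).map (·.2))
        = a :: pvStartsR a rest := by
      simp only [List.map_cons, List.zip_cons_cons, List.filter_cons]
      simp [pvStartCond, pvStarts_eq rest a]
    have he := pvEnds_eq (a :: rest)
    simp only [List.tail_cons] at he
    simp only [pvPeriodsA, pvPeriodsB, PySem.List.slice_from_one, List.tail_cons, hs]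
    rw [he, pvZip_eq, pvFoldA_eq, PySem.Set.ofList_eq_foldl]
    rfl

theorem pvFinish_eq (cps : List (Int × Int)) (dey : Option Int) :
    pvFinishA cps dey = pvFinishB cps dey := by
  cases cps with
  | nil =>
    cases dey with
    | none => rfl
    | some d => by_cases h : d = 0 <;> simp [pvFinishA, pvFinishB, pvTruthy, h]
  | cons p rest =>
    cases dey with
    | none => rfl
    | some d =>
      by_cases h : d = 0
      · simp [pvFinishA, pvFinishB, pvTruthy, h]
      · simp only [pvFinishA, pvFinishB, pvTruthy]
        simp [h]
        split <;> simp_all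

-- ===== VERDICT (by name: the statement is the Claim_ definition above) =====
theorem build_coverage_periods_spec : Claim_equal_build_coverage_periods := by
  intro yearly_info declared_end_year _ _
  unfold Spec_build_coverage_periods build_coverage_periods build_coverage_periods_alt
  rw [pvPeriods_eq, pvFinish_eq]
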